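-- pv_equiv track=rewrite | github.com/AlexeyTuboltsev/house_puzzle | puzzle_engine.py | _pixel_adjacency
-- ===== SOURCE A (Python) =====
-- from collections import defaultdict
--
-- def _pixel_adjacency(border_a: set, border_b: set,
--                      gap: int, min_border: int) -> bool:
--     """Check if two border pixel sets share enough common border.
--
--     Uses spatial bucketing for efficiency: bucket border_b pixels into
--     a grid of cell size `gap`, then for each border_a pixel check only
--     the 3x3 neighbourhood of grid cells.
--     """
--     if not border_a or not border_b:
--         return False
--
--     cell = max(gap, 1)
--     buckets: dict[tuple[int, int], list[tuple[int, int]]] = defaultdict(list)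
--     for (bx, by) in border_b:
--         buckets[(bx // cell, by // cell)].append((bx, by))
--
--     count = 0
--     for (ax, ay) in border_a:
--         gx, gy = ax // cell, ay // cell
--         found = False
--         for dx in range(-1, 2):
--             if found:
--                 break
--             for dy in range(-1, 2):
--                 bucket = buckets.get((gx + dx, gy + dy))
--                 if not bucket:
--                     continue
--                 for (bx, by) in bucket:
--                     if abs(ax - bx) <= gap and abs(ay - by) <= gap:
--                         found = True
--                         break
--                 if found:
--                     break
--         if found:
--             count += 1
--             if count >= min_border:
--                 return True
--     return False
-- ===== SOURCE B (Python) =====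
-- def _pixel_adjacency(border_a: set, border_b: set,
--                      gap: int, min_border: int) -> bool:
--     """Check if two border pixel sets share enough common border.
--
--     Plain quadratic scan: for each pixel of border_a, test every pixel of
--     border_b directly; no spatial index.
--     """
--     if not border_a or not border_b:
--         return False
--     count = 0
--     for (ax, ay) in border_a:
--         if any(abs(ax - bx) <= gap and abs(ay - by) <= gap
--                for (bx, by) in border_b):
--             count += 1
--             if count >= min_border:
--                 return True
--     return False
-- ===== Notes on version B (the rewrite author's own statement) =====
-- stated objective: simpler
-- what changed: Dropped the grid-bucket spatial index (defaultdict of cells plus a 3x3 neighbourhood probe) in favour of a direct nested scan of border_b with any(), keeping the identical counting/threshold logic.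
import Mathlib
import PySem

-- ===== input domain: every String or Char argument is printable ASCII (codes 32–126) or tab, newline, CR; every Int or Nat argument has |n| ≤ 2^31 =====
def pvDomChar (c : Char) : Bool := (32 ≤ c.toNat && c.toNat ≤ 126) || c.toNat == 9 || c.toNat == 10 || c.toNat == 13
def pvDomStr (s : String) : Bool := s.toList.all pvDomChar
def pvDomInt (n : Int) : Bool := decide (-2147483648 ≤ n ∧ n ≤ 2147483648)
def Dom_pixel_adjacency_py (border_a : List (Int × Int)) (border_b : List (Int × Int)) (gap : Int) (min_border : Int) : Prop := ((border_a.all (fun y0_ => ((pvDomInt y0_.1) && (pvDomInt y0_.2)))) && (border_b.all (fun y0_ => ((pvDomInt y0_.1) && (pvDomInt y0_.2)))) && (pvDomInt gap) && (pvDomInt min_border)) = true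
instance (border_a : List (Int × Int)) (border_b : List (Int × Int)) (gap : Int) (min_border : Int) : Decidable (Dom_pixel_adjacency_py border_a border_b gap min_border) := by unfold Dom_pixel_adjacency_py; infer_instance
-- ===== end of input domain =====

-- B replaces A's grid-bucket spatial index with a direct nested scan of border_b
-- (simpler, no speed claim); identical counting/threshold logic and return value.

-- ===== PORT A =====
-- build the buckets: defaultdict(list); buckets[(bx // cell, by // cell)].append((bx, by))
def pvBuckets (border_b : List (Int × Int)) (cell : Int) :
    PySem.Dict (Int × Int) (List (Int × Int)) :=
  border_b.foldl
    (fun d p =>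
      d.modify (PySem.Int.floordiv p.1 cell, PySem.Int.floordiv p.2 cell) [] (· ++ [p]))
    PySem.Dict.empty

-- the inner 3x3 search with breaks: `any` is the early-exit loop
def pvFoundA (buckets : PySem.Dict (Int × Int) (List (Int × Int)))
    (cell gap ax ay : Int) : Bool :=
  let gx := PySem.Int.floordiv ax cell
  let gy := PySem.Int.floordiv ay cell
  (PySem.List.pyRange (-1) 2 1).any fun dx =>
    (PySem.List.pyRange (-1) 2 1).any fun dy =>
      match buckets.get? (gx + dx, gy + dy) with
      | none => false   -- `if not bucket: continue` (also skips an empty bucket)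
      | some bucket => bucket.any fun p =>
          decide (|ax - p.1| ≤ gap ∧ |ay - p.2| ≤ gap)

-- the outer loop with `count` and early `return True`
def pvLoopA (buckets : PySem.Dict (Int × Int) (List (Int × Int)))
    (cell gap min_border : Int) : List (Int × Int) → Int → Bool
  | [], _ => false
  | (ax, ay) :: rest, count =>
    if pvFoundA buckets cell gap ax ay then
      if count + 1 ≥ min_border then true
      else pvLoopA buckets cell gap min_border rest (count + 1)
    else pvLoopA buckets cell gap min_border rest count

def pixel_adjacency_py (border_a : List (Int × Int)) (border_b : List (Int × Int)) (gap : Int) (min_border : Int) : Bool :=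
  if border_a.isEmpty || border_b.isEmpty then false
  else
    let cell := max gap 1
    pvLoopA (pvBuckets border_b cell) cell gap min_border border_a 0

-- ===== PORT B =====
-- `any(abs(ax - bx) <= gap and abs(ay - by) <= gap for (bx, by) in border_b)`
def pvFoundB (border_b : List (Int × Int)) (gap ax ay : Int) : Bool :=
  border_b.any fun p => decide (|ax - p.1| ≤ gap ∧ |ay - p.2| ≤ gap)

def pvLoopB (border_b : List (Int × Int)) (gap min_border : Int) :
    List (Int × Int) → Int → Bool
  | [], _ => false
  | (ax, ay) :: rest, count =>
    if pvFoundB border_b gap ax ay then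
      if count + 1 ≥ min_border then true
      else pvLoopB border_b gap min_border rest (count + 1)
    else pvLoopB border_b gap min_border rest count

def pixel_adjacency_py_alt (border_a : List (Int × Int)) (border_b : List (Int × Int)) (gap : Int) (min_border : Int) : Bool :=
  if border_a.isEmpty || border_b.isEmpty then false
  else pvLoopB border_b gap min_border border_a 0

-- ===== PRECONDITION & SPEC =====
def Spec_pixel_adjacency_py (border_a : List (Int × Int)) (border_b : List (Int × Int)) (gap : Int) (min_border : Int) (out : Bool) : Prop := out = pixel_adjacency_py_alt border_a border_b gap min_border
instance (border_a : List (Int × Int)) (border_b : List (Int × Int)) (gap : Int) (min_border : Int) (out : Bool) : Decidable (Spec_pixel_adjacency_py border_a border_b gap min_border out) := by unfold Spec_pixel_adjacency_py; infer_instance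

-- ===== CLAIM (what is proved, stated in full; the proofs are below) =====
def Claim_equal_pixel_adjacency_py : Prop := ∀ (border_a : List (Int × Int)) (border_b : List (Int × Int)) (gap : Int) (min_border : Int), Dom_pixel_adjacency_py border_a border_b gap min_border → Spec_pixel_adjacency_py border_a border_b gap min_border (pixel_adjacency_py border_a border_b gap min_border)

-- ===== LEMMAS AND PROOFS =====

-- floor-division quotients of points at distance ≤ c (c > 0) differ by at most 1
lemma pv_floor_close {c a b : Int} (hc : 0 < c) (h1 : a - b ≤ c) (h2 : b - a ≤ c) :
    -1 ≤ a / c - b / c ∧ a / c - b / c ≤ 1 := by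
  have ha := Int.mul_ediv_add_emod a c
  have hb := Int.mul_ediv_add_emod b c
  have ha1 := Int.emod_nonneg a (by omega : c ≠ 0)
  have ha2 := Int.emod_lt_of_pos a hc
  have hb1 := Int.emod_nonneg b (by omega : c ≠ 0)
  have hb2 := Int.emod_lt_of_pos b hc
  constructor
  · nlinarith [Int.lt_iff_add_one_le.mp (show b / c - a / c < 2 by nlinarith)]
  · nlinarith [Int.lt_iff_add_one_le.mp (show a / c - b / c < 2 by nlinarith)]

-- bucket content: exactly the border_b points whose cell key matches
lemma pv_getD_buckets (border_b : List (Int × Int)) (cell : Int) (k : Int × Int) :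
    (pvBuckets border_b cell).getD k [] =
      border_b.filter
        (fun p => (PySem.Int.floordiv p.1 cell, PySem.Int.floordiv p.2 cell) == k) := by
  unfold pvBuckets
  rw [show border_b.foldl
        (fun d p => d.modify (PySem.Int.floordiv p.1 cell, PySem.Int.floordiv p.2 cell) [] (· ++ [p]))
        PySem.Dict.empty
      = (border_b.map
          (fun p => ((PySem.Int.floordiv p.1 cell, PySem.Int.floordiv p.2 cell), p))).foldl
          (fun d q => d.modify q.1 [] (· ++ [q.2])) PySem.Dict.empty
      from (List.foldl_map (f := fun p => ((PySem.Int.floordiv p.1 cell, PySem.Int.floordiv p.2 cell), p)) (g := fun (d : PySem.Dict (Int × Int) (List (Int × Int))) (q : (Int × Int) × (Int × Int)) => d.modify q.1 [] (· ++ [q.2]))).symm]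
  rw [PySem.Dict.getD_foldl_modify_append]
  simp [List.filter_map, List.map_map, Function.comp_def]

-- the match on get? is `any` over getD _ []
lemma pv_match_get? (d : PySem.Dict (Int × Int) (List (Int × Int))) (k : Int × Int)
    (pr : (Int × Int) → Bool) :
    (match d.get? k with
     | none => false
     | some bucket => bucket.any pr) = (d.getD k []).any pr := by
  rw [PySem.Dict.getD_eq_get?_getD]
  cases d.get? k <;> simp

lemma pv_found_eq (border_b : List (Int × Int)) (gap ax ay : Int) :
    pvFoundA (pvBuckets border_b (max gap 1)) (max gap 1) gap ax ay =
      pvFoundB border_b gap ax ay := by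
  have hcell : (0 : Int) < max gap 1 := by omega
  have hgap : gap ≤ max gap 1 := le_max_left _ _
  have hr : PySem.List.pyRange (-1) 2 1 = [-1, 0, 1] := by decide
  apply Bool.eq_iff_iff.mpr
  unfold pvFoundA pvFoundB
  simp only [pv_match_get?, pv_getD_buckets, hr, List.any_eq_true, List.mem_filter,
    PySem.Int.floordiv_eq_ediv_of_pos hcell, beq_iff_eq, Prod.mk.injEq, decide_eq_true_eq]
  constructor
  · rintro ⟨dx, _, dy, _, p, ⟨hp, _, _⟩, hpred⟩
    exact ⟨p, hp, hpred⟩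
  · rintro ⟨p, hp, h1, h2⟩
    set c := max gap 1 with hc
    have hx := pv_floor_close hcell (show p.1 - ax ≤ c by
        have := abs_le.mp h1; omega) (show ax - p.1 ≤ c by
        have := abs_le.mp h1; omega)
    have hy := pv_floor_close hcell (show p.2 - ay ≤ c by
        have := abs_le.mp h2; omega) (show ay - p.2 ≤ c by
        have := abs_le.mp h2; omega)
    refine ⟨p.1 / c - ax / c, ?_, p.2 / c - ay / c, ?_, p, ⟨hp, by ring, by ring⟩, h1, h2⟩
    · have : p.1 / c - ax / c = -1 ∨ p.1 / c - ax / c = 0 ∨ p.1 / c - ax / c = 1 := by omega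
      rcases this with h | h | h <;> simp [h]
    · have : p.2 / c - ay / c = -1 ∨ p.2 / c - ay / c = 0 ∨ p.2 / c - ay / c = 1 := by omega
      rcases this with h | h | h <;> simp [h]

lemma pv_loop_eq (border_b : List (Int × Int)) (gap min_border : Int)
    (l : List (Int × Int)) (count : Int) :
    pvLoopA (pvBuckets border_b (max gap 1)) (max gap 1) gap min_border l count =
      pvLoopB border_b gap min_border l count := by
  induction l generalizing count with
  | nil => rfl
  | cons hd tl ih =>
    obtain ⟨ax, ay⟩ := hd
    simp only [pvLoopA, pvLoopB, pv_found_eq]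
    split_ifs <;> [rfl; exact ih _; exact ih _]

-- ===== VERDICT (by name: the statement is the Claim_ definition above) =====
theorem pixel_adjacency_py_spec : Claim_equal_pixel_adjacency_py := by
  intro border_a border_b gap min_border _
  unfold Spec_pixel_adjacency_py pixel_adjacency_py pixel_adjacency_py_alt
  split_ifs with h
  · rfl
  · exact pv_loop_eq border_b gap min_border border_a 0
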